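-- pv_equiv track=rewrite | github.com/thisisaayush/Programming-Language | CodingPreparation/Old Coding Questions/06-Dictionary/02_commonFrequecy.py | commonFrequency
-- ===== SOURCE A (Python) =====
-- def commonFrequency(list1, list2):
--     countlist1 = {}
--     for x in list1:
--         if x in countlist1:
--             countlist1[x] += 1
--         else:
--             countlist1[x] = 1
--
--     commonFrequency = {}
--
--     for x in list2:
--         if x in countlist1 and x not in commonFrequency:
--             commonFrequency[x] = countlist1[x]
--         elif x in countlist1 and x in commonFrequency:
--             commonFrequency[x] += 1
--
--     return commonFrequency
-- ===== SOURCE B (Python) =====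
-- def commonFrequency(list1, list2):
--     count1 = {}
--     for x in list1:
--         count1[x] = count1.get(x, 0) + 1
--     count2 = {}
--     for x in list2:
--         count2[x] = count2.get(x, 0) + 1
--     return {k: count1[k] + c - 1 for k, c in count2.items() if k in count1}
-- ===== Notes on version B (the rewrite author's own statement) =====
-- stated objective: simpler
-- what changed: A seeds each common key with list1's count on first sight in list2 and then increments per later occurrence; B instead builds complete frequency maps of both lists and combines them in closed form (count1[k] + count2[k] - 1) over list2's first-appearance key order.
import Mathlib
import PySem

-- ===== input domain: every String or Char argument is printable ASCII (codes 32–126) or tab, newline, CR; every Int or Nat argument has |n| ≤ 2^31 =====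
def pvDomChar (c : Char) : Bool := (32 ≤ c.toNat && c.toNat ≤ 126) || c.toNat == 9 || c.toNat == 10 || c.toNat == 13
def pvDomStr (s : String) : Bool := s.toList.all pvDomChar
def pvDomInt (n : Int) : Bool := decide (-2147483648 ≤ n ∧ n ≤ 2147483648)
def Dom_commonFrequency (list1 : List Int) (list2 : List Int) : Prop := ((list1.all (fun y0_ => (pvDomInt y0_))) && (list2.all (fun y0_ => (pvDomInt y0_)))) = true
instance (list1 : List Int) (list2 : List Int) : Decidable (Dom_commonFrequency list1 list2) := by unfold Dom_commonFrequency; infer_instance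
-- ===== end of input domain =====

-- B builds full frequency maps of both lists and combines them arithmetically
-- (count1[k] + count2[k] - 1), instead of A's incremental seed-then-bump build.

-- ===== PORT A =====
def commonFrequency (list1 : List Int) (list2 : List Int) : List (Int × Int) :=
  let countlist1 : PySem.Dict Int Int := list1.foldl (fun d x =>
    if d.contains x then d.modify x 0 (· + 1) else d.insert x 1) PySem.Dict.empty
  let cf : PySem.Dict Int Int := list2.foldl (fun d x =>
    if countlist1.contains x && !(d.contains x) then d.insert x (countlist1.getD x 0)
    else if countlist1.contains x && d.contains x then d.modify x 0 (· + 1)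
    else d) PySem.Dict.empty
  cf.items

-- ===== PORT B =====
def commonFrequency_alt (list1 : List Int) (list2 : List Int) : List (Int × Int) :=
  let count1 : PySem.Dict Int Int := list1.foldl (fun d x =>
    d.insert x (d.getD x 0 + 1)) PySem.Dict.empty
  let count2 : PySem.Dict Int Int := list2.foldl (fun d x =>
    d.insert x (d.getD x 0 + 1)) PySem.Dict.empty
  (count2.items.foldl (fun d p =>
    if count1.contains p.1 then d.insert p.1 (count1.getD p.1 0 + p.2 - 1) else d)
    PySem.Dict.empty).items

-- ===== PRECONDITION & SPEC =====
def Spec_commonFrequency (list1 : List Int) (list2 : List Int) (out : List (Int × Int)) : Prop := out = commonFrequency_alt list1 list2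
instance (list1 : List Int) (list2 : List Int) (out : List (Int × Int)) : Decidable (Spec_commonFrequency list1 list2 out) := by unfold Spec_commonFrequency; infer_instance

-- ===== CLAIM (what is proved, stated in full; the proofs are below) =====
def Claim_equal_commonFrequency : Prop := ∀ (list1 : List Int) (list2 : List Int), Dom_commonFrequency list1 list2 → Spec_commonFrequency list1 list2 (commonFrequency list1 list2)

-- ===== LEMMAS AND PROOFS =====

-- A's first loop builds exactly Counter(list1).
theorem loop1_eq_counter (l : List Int) :
    l.foldl (fun d x => if d.contains x then d.modify x 0 (· + 1) else d.insert x 1)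
      PySem.Dict.empty = PySem.Dict.counter l := by
  induction l using List.reverseRecOn with
  | nil => rfl
  | append_singleton l x ih =>
      have hR : PySem.Dict.counter (l ++ [x]) = (PySem.Dict.counter l).modify x 0 (· + 1) := by
        simp [PySem.Dict.counter_eq_foldl, List.foldl_append]
      rw [List.foldl_append, ih, hR]
      simp only [List.foldl_cons, List.foldl_nil]
      by_cases hx : (PySem.Dict.counter l).contains x = true
      · simp [hx]
      · have hx' : (PySem.Dict.counter l).contains x = false := by simpa using hx
        have hm : (PySem.Dict.counter l).modify x 0 (· + 1)
            = (PySem.Dict.counter l).insert x ((PySem.Dict.counter l).getD x 0 + 1) := rfl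
        rw [if_neg hx, hm, PySem.Dict.getD_of_not_contains _ _ hx']
        norm_num

-- Sets: ofList commutes with filter.
theorem ofList_filter (p : Int → Bool) (l : List Int) :
    PySem.Set.ofList (l.filter p) = (PySem.Set.ofList l).filter p := by
  induction l using List.reverseRecOn with
  | nil => rfl
  | append_singleton l x ih =>
      by_cases hp : p x = true
      · rw [List.filter_append, show List.filter p [x] = [x] by simp [hp],
          PySem.Set.ofList_append_singleton, PySem.Set.ofList_append_singleton, ih,
          PySem.Set.add_eq_ite, PySem.Set.add_eq_ite]
        by_cases hx : x ∈ PySem.Set.ofList l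
        · rw [if_pos hx, if_pos (by simp [List.mem_filter, hx, hp])]
        · rw [if_neg hx, if_neg (by simp [List.mem_filter, hx]), List.filter_append]
          simp [hp]
      · have hp' : p x = false := by simpa using hp
        rw [List.filter_append, show List.filter p [x] = [] by simp [hp'],
          List.append_nil, ih, PySem.Set.ofList_append_singleton, PySem.Set.add_eq_ite]
        by_cases hx : x ∈ PySem.Set.ofList l
        · rw [if_pos hx]
        · rw [if_neg hx, List.filter_append]
          simp [hp']

-- Characterisation of A's second loop: its keys are the common elements in list2's
-- first-appearance order, and each stored value is c1[k] + count(k, l) - 1.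
theorem loop2_char (c1 : PySem.Dict Int Int) (l : List Int) :
    (l.foldl (fun d x =>
        if c1.contains x && !(d.contains x) then d.insert x (c1.getD x 0)
        else if c1.contains x && d.contains x then d.modify x 0 (· + 1)
        else d) PySem.Dict.empty).keys
      = PySem.Set.ofList (l.filter (fun x => c1.contains x))
    ∧ ∀ k, (l.foldl (fun d x =>
        if c1.contains x && !(d.contains x) then d.insert x (c1.getD x 0)
        else if c1.contains x && d.contains x then d.modify x 0 (· + 1)
        else d) PySem.Dict.empty).getD k 0
      = if c1.contains k && decide (k ∈ l) then c1.getD k 0 + (l.count k : Int) - 1 else 0 := by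
  induction l using List.reverseRecOn with
  | nil =>
      refine ⟨rfl, fun k => ?_⟩
      simp [PySem.Dict.getD_empty]
  | append_singleton l x ih =>
      obtain ⟨hk, hg⟩ := ih
      rw [List.foldl_append]
      simp only [List.foldl_cons, List.foldl_nil]
      set d := l.foldl (fun d x =>
        if c1.contains x && !(d.contains x) then d.insert x (c1.getD x 0)
        else if c1.contains x && d.contains x then d.modify x 0 (· + 1)
        else d) PySem.Dict.empty with hd
      have hdmem : ∀ y, d.contains y = true ↔ (c1.contains y = true ∧ y ∈ l) := by
        intro y
        rw [PySem.Dict.contains_iff_mem_keys, hk, PySem.Set.mem_ofList, List.mem_filter]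
        tauto
      by_cases hcx : c1.contains x = true
      · by_cases hxl : x ∈ l
        · have hdx : d.contains x = true := (hdmem x).2 ⟨hcx, hxl⟩
          rw [if_neg (by simp [hcx, hdx]), if_pos (by simp [hcx, hdx])]
          constructor
          · rw [PySem.Dict.keys_modify, PySem.Dict.keys_insert_of_contains _ _ hdx,
              hk, List.filter_append]
            have : List.filter (fun x => c1.contains x) [x] = [x] := by simp [hcx]
            rw [this, PySem.Set.ofList_append_singleton,
              PySem.Set.add_of_mem (by rw [PySem.Set.mem_ofList, List.mem_filter]; exact ⟨hxl, hcx⟩)]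
          · intro k
            rw [PySem.Dict.getD_modify]
            by_cases hkx : k = x
            · subst hkx
              rw [if_pos rfl, hg k, if_pos (by simp [hcx, hxl]),
                if_pos (by simp [hcx, hxl])]
              have hcnt : (l ++ [k]).count k = l.count k + 1 := by
                simp [List.count_append]
              rw [hcnt]
              push_cast
              ring
            · rw [if_neg hkx, hg k]
              have hc : (l ++ [x]).count k = l.count k := by
                simp [List.count_append, List.count_singleton]
                intro h; exact absurd h.symm hkx
              have hm : decide (k ∈ l ++ [x]) = decide (k ∈ l) := by
                simp [List.mem_append, hkx]
              rw [hc, hm]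
        · have hdx : d.contains x = false := by
            rw [Bool.eq_false_iff]
            intro h
            exact hxl ((hdmem x).1 h).2
          rw [if_pos (by simp [hcx, hdx])]
          constructor
          · rw [PySem.Dict.keys_insert_of_not_contains _ _ hdx, hk, List.filter_append]
            have : List.filter (fun x => c1.contains x) [x] = [x] := by simp [hcx]
            rw [this, PySem.Set.ofList_append_singleton,
              PySem.Set.add_of_not_mem (by rw [PySem.Set.mem_ofList, List.mem_filter]; tauto)]
          · intro k
            rw [PySem.Dict.getD_insert]
            by_cases hkx : k = x
            · subst hkx
              rw [if_pos rfl, if_pos (by simp [hcx, List.mem_append])]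
              have hcnt : (l ++ [k]).count k = 1 := by
                simp [List.count_append, List.count_eq_zero.mpr hxl]
              rw [hcnt]
              push_cast
              ring
            · rw [if_neg hkx, hg k]
              have hc : (l ++ [x]).count k = l.count k := by
                simp [List.count_append, List.count_singleton]
                intro h; exact absurd h.symm hkx
              have hm : decide (k ∈ l ++ [x]) = decide (k ∈ l) := by
                simp [List.mem_append, hkx]
              rw [hc, hm]
      · have hcx' : c1.contains x = false := by simpa using hcx
        rw [if_neg (by simp [hcx']), if_neg (by simp [hcx'])]
        constructor
        · rw [hk, List.filter_append]
          have : List.filter (fun x => c1.contains x) [x] = [] := by simp [hcx']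
          rw [this, List.append_nil]
        · intro k
          rw [hg k]
          by_cases hkx : k = x
          · subst hkx
            simp [hcx']
          · have hc : (l ++ [x]).count k = l.count k := by
              simp [List.count_append, List.count_singleton]
              intro h; exact absurd h.symm hkx
            have hm : decide (k ∈ l ++ [x]) = decide (k ∈ l) := by
              simp [List.mem_append, hkx]
            rw [hc, hm]

-- ===== VERDICT (by name: the statement is the Claim_ definition above) =====
theorem commonFrequency_spec : Claim_equal_commonFrequency := by
  intro list1 list2 _
  unfold Spec_commonFrequency commonFrequency commonFrequency_alt
  simp only [loop1_eq_counter, PySem.Dict.foldl_insert_getD_add_one_eq_counter]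
  obtain ⟨hk, hg⟩ := loop2_char (PySem.Dict.counter list1) list2
  set c1 := PySem.Dict.counter list1 with hc1
  set d := list2.foldl (fun d x =>
      if c1.contains x && !(d.contains x) then d.insert x (c1.getD x 0)
      else if c1.contains x && d.contains x then d.modify x 0 (· + 1)
      else d) PySem.Dict.empty with hd
  -- A's side: items as a map over the common keys
  have hnd : d.keys.Nodup := by rw [hk]; exact PySem.Set.nodup_ofList _
  have hA : d.items = d.keys.map (fun k => (k, d.getD k 0)) :=
    PySem.Dict.items_eq_map_keys d hnd 0
  rw [hA, hk, ofList_filter]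
  -- B's side
  rw [PySem.Dict.items_counter, PySem.List.foldl_if_eq_foldl_filter, List.filter_map]
  have hcomp : ((fun p : Int × Int => c1.contains p.1) ∘ fun k => (k, (list2.count k : Int)))
      = fun k => c1.contains k := rfl
  rw [hcomp]
  have hins := PySem.Dict.items_foldl_insert_fresh
    (List.map (fun k => (k, (list2.count k : Int)))
      (List.filter (fun k => c1.contains k) (PySem.Set.ofList list2)))
    (fun p : Int × Int => p.1)
    (fun p : Int × Int => c1.getD p.1 0 + p.2 - 1)
    PySem.Dict.empty
    (fun a _ => PySem.Dict.contains_empty _)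
    (by
      rw [List.map_map,
        show ((fun p : Int × Int => p.1) ∘ fun k : Int => (k, (list2.count k : Int))) = id from rfl,
        List.map_id]
      exact (PySem.Set.nodup_ofList list2).filter _)
  rw [hins]
  have hem : (PySem.Dict.empty : PySem.Dict Int Int).items = [] := rfl
  rw [hem, List.nil_append, List.map_map]
  apply List.map_congr_left
  intro k hkmem
  obtain ⟨hk2, hkc⟩ := List.mem_filter.mp hkmem
  have hk2' : k ∈ list2 := (PySem.Set.mem_ofList _ _).mp hk2
  rw [hg k, if_pos (by simp [hkc, hk2'])]
  rfl
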